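-- pv_equiv track=rewrite | github.com/yanliyue/Street-Walkability-Evaluation | run_demo.py | find_label_ids
-- ===== SOURCE A (Python) =====
-- def normalize_label_name(name: str):
--     return name.lower().replace("-", " ").replace("_", " ").strip()
--
-- def find_label_ids(id2label):
--     groups = {
--         "high_walk": [],
--         "mid_walk": [],
--         "obstacle": [],
--         "vehicle": [],
--         "light_dynamic": [],
--         "sky": [],
--         "building": [],
--     }
--
--     for idx, label in id2label.items():
--         name = normalize_label_name(str(label))
--
--         if any(k in name for k in [
--             "sidewalk",
--             "crosswalk",
--             "pedestrian area",
--             "lane marking crosswalk",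
--             "zebra"
--         ]):
--             groups["high_walk"].append(int(idx))
--             continue
--
--         if any(k in name for k in [
--             "road",
--             "service lane",
--             "bike lane",
--             "street",
--             "driveway",
--             "alley",
--             "residential road"
--         ]):
--             groups["mid_walk"].append(int(idx))
--             continue
--
--         if any(k in name for k in [
--             "car",
--             "bus",
--             "truck",
--             "vehicle",
--             "van",
--             "motorcycle"
--         ]):
--             groups["vehicle"].append(int(idx))
--             continue
--
--         if any(k in name for k in [
--             "person",
--             "pedestrian",
--             "bicyclist",
--             "cyclist",
--             "bicycle",
--             "rider"
--         ]):
--             groups["light_dynamic"].append(int(idx))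
--             continue
--
--         if "sky" in name:
--             groups["sky"].append(int(idx))
--             continue
--
--         if any(k in name for k in [
--             "building",
--             "house",
--             "garage",
--             "bridge",
--             "tunnel"
--         ]):
--             groups["building"].append(int(idx))
--             continue
--
--         if any(k in name for k in [
--             "wall",
--             "fence",
--             "pole",
--             "traffic sign",
--             "traffic light",
--             "curb",
--             "barrier",
--             "rail",
--             "guard rail",
--             "sign",
--             "lamp",
--             "bench",
--             "trash",
--             "vegetation",
--             "terrain"
--         ]):
--             groups["obstacle"].append(int(idx))
--             continue
--
--     return groups
-- ===== SOURCE B (Python) =====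
-- def normalize_label_name(name: str):
--     return name.lower().replace("-", " ").replace("_", " ").strip()
--
-- _PRIORITY = [
--     ("high_walk", ["sidewalk", "crosswalk", "pedestrian area",
--                    "lane marking crosswalk", "zebra"]),
--     ("mid_walk", ["road", "service lane", "bike lane", "street",
--                   "driveway", "alley", "residential road"]),
--     ("vehicle", ["car", "bus", "truck", "vehicle", "van", "motorcycle"]),
--     ("light_dynamic", ["person", "pedestrian", "bicyclist", "cyclist",
--                        "bicycle", "rider"]),
--     ("sky", ["sky"]),
--     ("building", ["building", "house", "garage", "bridge", "tunnel"]),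
--     ("obstacle", ["wall", "fence", "pole", "traffic sign", "traffic light",
--                   "curb", "barrier", "rail", "guard rail", "sign", "lamp",
--                   "bench", "trash", "vegetation", "terrain"]),
-- ]
--
-- def find_label_ids(id2label):
--     # group-major: seven staged passes over a shrinking pool of unassigned labels
--     groups = {g: [] for g in ["high_walk", "mid_walk", "obstacle", "vehicle",
--                               "light_dynamic", "sky", "building"]}
--     remaining = [(int(i), normalize_label_name(str(lbl)))
--                  for i, lbl in id2label.items()]
--     for group, keywords in _PRIORITY:
--         groups[group] = [i for i, name in remaining
--                          if any(k in name for k in keywords)]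
--         remaining = [(i, name) for i, name in remaining
--                      if not any(k in name for k in keywords)]
--     return groups
-- ===== Notes on version B (the rewrite author's own statement) =====
-- stated objective: alternative
-- what changed: A classifies label-major (one pass over labels, a seven-branch if/continue chain per label); B classifies group-major: it normalizes all labels once, then makes seven staged passes, one per group in priority order, each pass splitting the remaining unassigned pool into that group's matches and the rest.
import Mathlib
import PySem

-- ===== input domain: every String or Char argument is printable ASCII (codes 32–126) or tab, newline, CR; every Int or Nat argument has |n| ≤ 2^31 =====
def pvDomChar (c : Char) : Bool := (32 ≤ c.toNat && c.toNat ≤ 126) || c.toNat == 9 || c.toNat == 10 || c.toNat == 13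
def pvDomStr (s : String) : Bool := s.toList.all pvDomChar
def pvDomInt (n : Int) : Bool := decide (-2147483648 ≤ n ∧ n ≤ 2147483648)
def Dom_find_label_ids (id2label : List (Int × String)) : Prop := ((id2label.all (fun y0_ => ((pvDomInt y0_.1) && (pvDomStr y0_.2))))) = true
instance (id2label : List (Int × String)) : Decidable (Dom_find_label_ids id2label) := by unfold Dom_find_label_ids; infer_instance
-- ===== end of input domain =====

-- B replaces A's label-major pass with its seven-branch if/continue chain by a
-- group-major classification: seven staged passes, one per group in priority order,
-- each splitting the remaining unassigned pool (objective: alternative; same cost).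

-- ===== PORT A =====
-- shared helper: normalize_label_name (identical in Source A and Source B)
def pvNorm (s : String) : String :=
  PySem.Str.strip (PySem.Str.replace (PySem.Str.replace (PySem.Str.lower s) "-" " ") "_" " ")

-- the initial groups dict (same seven keys, same order, in Source A and Source B)
def pvInitGroups : PySem.Dict String (List Int) :=
  (((((((PySem.Dict.empty.insert "high_walk" []).insert "mid_walk" []).insert
      "obstacle" []).insert "vehicle" []).insert "light_dynamic" []).insert
      "sky" []).insert "building" [])

-- loop body of A's for-loop (the seven if/continue branches)
def pvStepA (groups : PySem.Dict String (List Int)) (p : Int × String) :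
    PySem.Dict String (List Int) :=
    let name := pvNorm p.2
    if ["sidewalk", "crosswalk", "pedestrian area", "lane marking crosswalk",
        "zebra"].any (fun k => PySem.Str.isIn k name) then
      groups.modify "high_walk" [] (· ++ [p.1])
    else if ["road", "service lane", "bike lane", "street", "driveway", "alley",
        "residential road"].any (fun k => PySem.Str.isIn k name) then
      groups.modify "mid_walk" [] (· ++ [p.1])
    else if ["car", "bus", "truck", "vehicle", "van",
        "motorcycle"].any (fun k => PySem.Str.isIn k name) then
      groups.modify "vehicle" [] (· ++ [p.1])
    else if ["person", "pedestrian", "bicyclist", "cyclist", "bicycle",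
        "rider"].any (fun k => PySem.Str.isIn k name) then
      groups.modify "light_dynamic" [] (· ++ [p.1])
    else if PySem.Str.isIn "sky" name then
      groups.modify "sky" [] (· ++ [p.1])
    else if ["building", "house", "garage", "bridge",
        "tunnel"].any (fun k => PySem.Str.isIn k name) then
      groups.modify "building" [] (· ++ [p.1])
    else if ["wall", "fence", "pole", "traffic sign", "traffic light", "curb",
        "barrier", "rail", "guard rail", "sign", "lamp", "bench", "trash",
        "vegetation", "terrain"].any (fun k => PySem.Str.isIn k name) then
      groups.modify "obstacle" [] (· ++ [p.1])
    else groups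

def find_label_ids (id2label : List (Int × String)) : List (String × List Int) :=
  (id2label.foldl pvStepA pvInitGroups).items

-- ===== PORT B =====
def pvPriority : List (String × List String) :=
  [("high_walk", ["sidewalk", "crosswalk", "pedestrian area",
                  "lane marking crosswalk", "zebra"]),
   ("mid_walk", ["road", "service lane", "bike lane", "street", "driveway",
                 "alley", "residential road"]),
   ("vehicle", ["car", "bus", "truck", "vehicle", "van", "motorcycle"]),
   ("light_dynamic", ["person", "pedestrian", "bicyclist", "cyclist",
                      "bicycle", "rider"]),
   ("sky", ["sky"]),
   ("building", ["building", "house", "garage", "bridge", "tunnel"]),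
   ("obstacle", ["wall", "fence", "pole", "traffic sign", "traffic light",
                 "curb", "barrier", "rail", "guard rail", "sign", "lamp",
                 "bench", "trash", "vegetation", "terrain"])]

-- one staged pass of B: assign this group's matches, keep the rest as the new pool
def pvStepB (st : PySem.Dict String (List Int) × List (Int × String))
    (row : String × List String) :
    PySem.Dict String (List Int) × List (Int × String) :=
  (st.1.insert row.1
     ((st.2.filter (fun q => row.2.any (fun k => PySem.Str.isIn k q.2))).map (·.1)),
   st.2.filter (fun q => !(row.2.any (fun k => PySem.Str.isIn k q.2))))

-- the normalized pool: [(int(i), normalize_label_name(str(lbl))) for i, lbl in id2label.items()]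
def pvRem (id2label : List (Int × String)) : List (Int × String) :=
  id2label.map (fun p => (p.1, pvNorm p.2))

def find_label_ids_alt (id2label : List (Int × String)) : List (String × List Int) :=
  (pvPriority.foldl pvStepB (pvInitGroups, pvRem id2label)).1.items

-- ===== PRECONDITION & SPEC =====
def Spec_find_label_ids (id2label : List (Int × String)) (out : List (String × List Int)) : Prop := out = find_label_ids_alt id2label
instance (id2label : List (Int × String)) (out : List (String × List Int)) : Decidable (Spec_find_label_ids id2label out) := by unfold Spec_find_label_ids; infer_instance

-- ===== CLAIM (what is proved, stated in full; the proofs are below) =====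
def Claim_equal_find_label_ids : Prop := ∀ (id2label : List (Int × String)), Dom_find_label_ids id2label → Spec_find_label_ids id2label (find_label_ids id2label)

-- ===== LEMMAS AND PROOFS =====

-- proof-side helpers: keyword matchers for the seven groups (in A's branch order)
def pvM1 (n : String) : Bool := ["sidewalk", "crosswalk", "pedestrian area",
  "lane marking crosswalk", "zebra"].any (fun k => PySem.Str.isIn k n)
def pvM2 (n : String) : Bool := ["road", "service lane", "bike lane", "street",
  "driveway", "alley", "residential road"].any (fun k => PySem.Str.isIn k n)
def pvM3 (n : String) : Bool := ["car", "bus", "truck", "vehicle", "van",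
  "motorcycle"].any (fun k => PySem.Str.isIn k n)
def pvM4 (n : String) : Bool := ["person", "pedestrian", "bicyclist", "cyclist",
  "bicycle", "rider"].any (fun k => PySem.Str.isIn k n)
def pvM5 (n : String) : Bool := PySem.Str.isIn "sky" n
def pvM6 (n : String) : Bool := ["building", "house", "garage", "bridge",
  "tunnel"].any (fun k => PySem.Str.isIn k n)
def pvM7 (n : String) : Bool := ["wall", "fence", "pole", "traffic sign",
  "traffic light", "curb", "barrier", "rail", "guard rail", "sign", "lamp",
  "bench", "trash", "vegetation", "terrain"].any (fun k => PySem.Str.isIn k n)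

-- first-match ("earliest matching group") predicates
def pvC1 (n : String) : Bool := pvM1 n
def pvC2 (n : String) : Bool := pvM2 n && !pvM1 n
def pvC3 (n : String) : Bool := pvM3 n && (!pvM2 n && !pvM1 n)
def pvC4 (n : String) : Bool := pvM4 n && (!pvM3 n && (!pvM2 n && !pvM1 n))
def pvC5 (n : String) : Bool := pvM5 n && (!pvM4 n && (!pvM3 n && (!pvM2 n && !pvM1 n)))
def pvC6 (n : String) : Bool := pvM6 n && (!pvM5 n && (!pvM4 n && (!pvM3 n && (!pvM2 n && !pvM1 n))))
def pvC7 (n : String) : Bool := pvM7 n && (!pvM6 n && (!pvM5 n && (!pvM4 n && (!pvM3 n && (!pvM2 n && !pvM1 n)))))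

-- ids of l whose normalized name satisfies p, in order
def pvSel (p : String → Bool) (l : List (Int × String)) : List Int :=
  (l.filter (fun q => p (pvNorm q.2))).map (·.1)

def pvMk (a b c d e f g : List Int) : PySem.Dict String (List Int) :=
  PySem.Dict.mk [("high_walk", a), ("mid_walk", b), ("obstacle", c),
    ("vehicle", d), ("light_dynamic", e), ("sky", f), ("building", g)]
lemma pvSel_cons (p : String → Bool) (q : Int × String) (l : List (Int × String)) :
    pvSel p (q :: l) = if p (pvNorm q.2) then q.1 :: pvSel p l else pvSel p l := by
  simp [pvSel, List.filter_cons]; split_ifs <;> simp_all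

set_option maxHeartbeats 1600000 in
lemma pvStepA_mk (a b c d e f g : List Int) (p : Int × String) :
    pvStepA (pvMk a b c d e f g) p =
      (if pvM1 (pvNorm p.2) then pvMk (a++[p.1]) b c d e f g
       else if pvM2 (pvNorm p.2) then pvMk a (b++[p.1]) c d e f g
       else if pvM3 (pvNorm p.2) then pvMk a b c (d++[p.1]) e f g
       else if pvM4 (pvNorm p.2) then pvMk a b c d (e++[p.1]) f g
       else if pvM5 (pvNorm p.2) then pvMk a b c d e (f++[p.1]) g
       else if pvM6 (pvNorm p.2) then pvMk a b c d e f (g++[p.1])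
       else if pvM7 (pvNorm p.2) then pvMk a b (c++[p.1]) d e f g
       else pvMk a b c d e f g) := by
  simp only [pvStepA, pvM1, pvM2, pvM3, pvM4, pvM5, pvM6, pvM7]
  split_ifs <;> rfl

lemma pv_foldA : ∀ (l : List (Int × String)) (a b c d e f g : List Int),
    l.foldl pvStepA (pvMk a b c d e f g) =
      pvMk (a ++ pvSel pvC1 l) (b ++ pvSel pvC2 l) (c ++ pvSel pvC7 l)
           (d ++ pvSel pvC3 l) (e ++ pvSel pvC4 l) (f ++ pvSel pvC5 l)
           (g ++ pvSel pvC6 l) := by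
  intro l
  induction l with
  | nil => intro a b c d e f g; simp [pvSel]
  | cons p l ih =>
    intro a b c d e f g
    rw [List.foldl_cons, pvStepA_mk]
    split_ifs with h1 h2 h3 h4 h5 h6 h7 <;> rw [ih] <;>
      simp [pvSel_cons, pvC1, pvC2, pvC3, pvC4, pvC5, pvC6, pvC7, *]

lemma pvInit_mk : pvInitGroups = pvMk [] [] [] [] [] [] [] := rfl
lemma pvInsHW (a b c d e f g v : List Int) : (pvMk a b c d e f g).insert "high_walk" v = pvMk v b c d e f g := rfl
lemma pvInsMW (a b c d e f g v : List Int) : (pvMk a b c d e f g).insert "mid_walk" v = pvMk a v c d e f g := rfl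
lemma pvInsOB (a b c d e f g v : List Int) : (pvMk a b c d e f g).insert "obstacle" v = pvMk a b v d e f g := rfl
lemma pvInsVE (a b c d e f g v : List Int) : (pvMk a b c d e f g).insert "vehicle" v = pvMk a b c v e f g := rfl
lemma pvInsLD (a b c d e f g v : List Int) : (pvMk a b c d e f g).insert "light_dynamic" v = pvMk a b c d v f g := rfl
lemma pvInsSK (a b c d e f g v : List Int) : (pvMk a b c d e f g).insert "sky" v = pvMk a b c d e v g := rfl
lemma pvInsBU (a b c d e f g v : List Int) : (pvMk a b c d e f g).insert "building" v = pvMk a b c d e f v := rfl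

lemma pvRem_filter (P : String → Bool) (l : List (Int × String)) :
    (pvRem l).filter (fun q => P q.2) = pvRem (l.filter (fun q => P (pvNorm q.2))) := by
  induction l with
  | nil => rfl
  | cons p l ih => simp [pvRem, List.filter_cons] at ih ⊢; split_ifs <;> simp [ih]

lemma pvRem_filter_any (ks : List String) (l : List (Int × String)) :
    (pvRem l).filter (fun q => ks.any (fun k => PySem.Str.isIn k q.2)) =
      pvRem (l.filter (fun q => ks.any (fun k => PySem.Str.isIn k (pvNorm q.2)))) :=
  pvRem_filter (fun n => ks.any (fun k => PySem.Str.isIn k n)) l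

lemma pvRem_filter_nany (ks : List String) (l : List (Int × String)) :
    (pvRem l).filter (fun q => !ks.any (fun k => PySem.Str.isIn k q.2)) =
      pvRem (l.filter (fun q => !ks.any (fun k => PySem.Str.isIn k (pvNorm q.2)))) :=
  pvRem_filter (fun n => !ks.any (fun k => PySem.Str.isIn k n)) l

lemma pvRem_map_fst (l : List (Int × String)) : (pvRem l).map (·.1) = l.map (·.1) := by
  simp [pvRem]

lemma pv_B (l : List (Int × String)) : find_label_ids_alt l =
    (pvMk (pvSel pvC1 l) (pvSel pvC2 l) (pvSel pvC7 l) (pvSel pvC3 l)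
          (pvSel pvC4 l) (pvSel pvC5 l) (pvSel pvC6 l)).items := by
  unfold find_label_ids_alt
  simp only [pvPriority, List.foldl_cons, List.foldl_nil, pvStepB, pvInit_mk,
    pvInsHW, pvInsMW, pvInsOB, pvInsVE, pvInsLD, pvInsSK, pvInsBU]
  simp only [pvRem_filter_any, pvRem_filter_nany, pvRem_map_fst, List.filter_filter]
  simp only [pvSel, pvC1, pvC2, pvC3, pvC4, pvC5, pvC6, pvC7,
    pvM1, pvM2, pvM3, pvM4, pvM5, pvM6, pvM7, List.any_cons, List.any_nil,
    Bool.or_false]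

theorem find_label_ids_spec : Claim_equal_find_label_ids := by
  intro l _
  unfold Spec_find_label_ids find_label_ids
  rw [pvInit_mk, pv_foldA, pv_B]
  simp
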